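-- pv_equiv track=rewrite | github.com/tahahamdii/more-javascript-practice | test.py | generate_vowel_string
-- ===== SOURCE A (Python) =====
-- def generate_vowel_string(n):
--     vowels = 'aeiou'
--     if n == 2:
--         return "uo"
--     elif n == 3:
--         return "iae"
--     else:
--         pattern = []
--         index = 3
--         for i in range(n):
--             pattern.append(vowels[index])
--             index = (index + 2) % 5
--         return ''.join(pattern)
-- ===== SOURCE B (Python) =====
-- def generate_vowel_string(n):
--     if n == 2:
--         return "uo"
--     if n == 3:
--         return "iae"
--     return ("oaiue" * (n // 5 + 1))[:n]
-- ===== Notes on version B (the rewrite author's own statement) =====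
-- stated objective: simpler
-- what changed: Replaces the per-character loop with mutable modular index state by one string repetition of the fixed 5-character cycle 'oaiue' followed by a slice; the two special-case guards for n==2 and n==3 are kept because A hardcodes those returns.
import Mathlib
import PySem

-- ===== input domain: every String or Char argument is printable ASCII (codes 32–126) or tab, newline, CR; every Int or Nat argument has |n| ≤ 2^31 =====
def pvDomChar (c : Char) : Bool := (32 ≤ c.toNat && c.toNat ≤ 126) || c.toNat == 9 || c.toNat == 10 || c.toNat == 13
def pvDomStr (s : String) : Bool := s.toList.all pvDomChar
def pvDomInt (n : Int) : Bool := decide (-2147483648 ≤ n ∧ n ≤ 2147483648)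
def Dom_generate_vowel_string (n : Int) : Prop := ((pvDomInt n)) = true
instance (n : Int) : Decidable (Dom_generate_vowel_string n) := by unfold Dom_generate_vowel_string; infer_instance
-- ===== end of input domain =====

-- B replaces A's per-character loop (mutable modular index) by repeating the fixed cycle "oaiue" and slicing; objective: simpler.


-- ===== PORT A =====
def generate_vowel_string (n : Int) : String :=
  let vowels : List Char := "aeiou".toList
  if n = 2 then "uo"
  else if n = 3 then "iae"
  else
    -- pattern = []; index = 3; for i in range(n): pattern.append(vowels[index]); index = (index+2) % 5
    let st := (PySem.List.pyRange 0 n 1).foldl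
      (fun (st : List Char × Int) _ =>
        (st.1 ++ [PySem.List.pyGetD vowels st.2 ' '], PySem.Int.mod (st.2 + 2) 5))
      ([], 3)
    String.mk st.1

-- ===== PORT B =====
def generate_vowel_string_alt (n : Int) : String :=
  if n = 2 then "uo"
  else if n = 3 then "iae"
  else
    -- ("oaiue" * (n // 5 + 1))[:n]
    let s : List Char := List.flatten (List.replicate (PySem.Int.floordiv n 5 + 1).toNat "oaiue".toList)
    String.mk (PySem.List.slice s none (some n))

-- ===== PRECONDITION & SPEC =====
def Spec_generate_vowel_string (n : Int) (out : String) : Prop := out = generate_vowel_string_alt n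
instance (n : Int) (out : String) : Decidable (Spec_generate_vowel_string n out) := by unfold Spec_generate_vowel_string; infer_instance

-- ===== CLAIM (what is proved, stated in full; the proofs are below) =====
def Claim_equal_generate_vowel_string : Prop := ∀ (n : Int), Dom_generate_vowel_string n → Spec_generate_vowel_string n (generate_vowel_string n)

-- ===== LEMMAS AND PROOFS =====

-- the cycle "oaiue" as a list of chars
def pvCyc : List Char := ['o', 'a', 'i', 'u', 'e']

-- indexing into the repeated cycle is indexing mod 5 into the cycle
lemma pvFlat_get (m k : Nat) (h : k < 5 * m) :
    (List.flatten (List.replicate m pvCyc))[k]? = pvCyc[k % 5]? := by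
  induction m generalizing k with
  | zero => omega
  | succ m ih =>
    rw [List.replicate_succ, List.flatten_cons, List.getElem?_append]
    by_cases hk : k < 5
    · simp [pvCyc, Nat.mod_eq_of_lt hk, hk]
    · have h5 : ¬ k < pvCyc.length := by simp [pvCyc]; omega
      rw [if_neg h5]
      have : pvCyc.length = 5 := by simp [pvCyc]
      rw [this, ih (k - 5) (by omega)]
      congr 1
      omega

-- loop invariant: after k iterations, pattern = first k chars of the repeated cycle,
-- and index = (3 + 2k) % 5
lemma pvLoop_inv (k m : Nat) (hm : k ≤ 5 * m) :
    (PySem.List.pyRange 0 (k : Int) 1).foldl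
      (fun (st : List Char × Int) _ =>
        (st.1 ++ [PySem.List.pyGetD "aeiou".toList st.2 ' '], PySem.Int.mod (st.2 + 2) 5))
      ([], 3)
    = ((List.flatten (List.replicate m pvCyc)).take k,
       PySem.Int.mod (3 + 2 * (k : Int)) 5) := by
  induction k with
  | zero =>
    simp
  | succ k ih =>
    have hr : PySem.List.pyRange 0 ((k : Int) + 1) 1
        = PySem.List.pyRange 0 (k : Int) 1 ++ [(k : Int)] :=
      PySem.List.pyRange_one_succ_right (by omega)
    have hcast : ((k + 1 : Nat) : Int) = (k : Int) + 1 := by push_cast; ring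
    rw [hcast, hr, List.foldl_append, ih (by omega)]
    simp only [List.foldl_cons, List.foldl_nil, Prod.mk.injEq]
    refine ⟨?_, ?_⟩
    · -- pattern part: take (k+1) = take k ++ [char at k]
      have hmod : PySem.Int.mod (3 + 2 * (k : Int)) 5 = (((3 + 2 * k) % 5 : Nat) : Int) := by
        rw [PySem.Int.mod_eq_emod_of_pos (by omega : (0:Int) < 5)]
        omega
      rw [hmod, PySem.List.pyGetD_natCast]
      have hget : (List.flatten (List.replicate m pvCyc))[k]? = pvCyc[k % 5]? :=
        pvFlat_get m k (by omega)
      rw [List.take_succ, hget]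
      congr 1
      have h5 : k % 5 = 0 ∨ k % 5 = 1 ∨ k % 5 = 2 ∨ k % 5 = 3 ∨ k % 5 = 4 := by omega
      rcases h5 with h | h | h | h | h <;>
        · have : (3 + 2 * k) % 5 = (3 + 2 * (k % 5)) % 5 := by omega
          rw [this, h]
          decide
    · -- index part
      simp only [PySem.Int.mod_eq_emod_of_pos (by omega : (0:Int) < 5)]
      omega

-- ===== VERDICT (by name: the statement is the Claim_ definition above) =====
theorem generate_vowel_string_spec : Claim_equal_generate_vowel_string := by
  intro n _
  unfold Spec_generate_vowel_string generate_vowel_string generate_vowel_string_alt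
  by_cases h2 : n = 2
  · simp [h2]
  by_cases h3 : n = 3
  · simp [h3]
  rw [if_neg h2, if_neg h3, if_neg h2, if_neg h3]
  by_cases hn : 0 ≤ n
  · -- nonnegative n: both are the first n characters of the repeated cycle
    have hfd : PySem.Int.floordiv n 5 = n / 5 := PySem.Int.floordiv_eq_ediv_of_pos (by omega)
    have hrep : (PySem.Int.floordiv n 5 + 1).toNat = n.toNat / 5 + 1 := by
      rw [hfd]; omega
    have hcast : n = ((n.toNat : Nat) : Int) := by omega
    have hle : n.toNat ≤ 5 * (n.toNat / 5 + 1) := by omega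
    rw [hrep]
    conv_lhs => rw [hcast]
    rw [pvLoop_inv n.toNat (n.toNat / 5 + 1) hle]
    dsimp only
    rw [PySem.List.slice_to _ hn]
    have hcyc : pvCyc = "oaiue".toList := by decide
    rw [hcyc]
  · -- negative n: both empty
    have hnil : PySem.List.pyRange 0 n 1 = [] := PySem.List.pyRange_one_eq_nil (by omega)
    have hfd : PySem.Int.floordiv n 5 = n / 5 := PySem.Int.floordiv_eq_ediv_of_pos (by omega)
    have hrep : (PySem.Int.floordiv n 5 + 1).toNat = 0 := by rw [hfd]; omega
    rw [hnil, hrep]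
    simp [PySem.List.slice]
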